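-- pv_equiv track=rewrite | github.com/jdupisanie/credit-data-generator | analytics/data_analysis/variable_selection.py | _feature_to_variable_name
-- ===== SOURCE A (Python) =====
-- def _feature_to_variable_name(feature: str, columns: list[str]) -> str:
--     raw = feature
--     if feature.startswith("cat__"):
--         raw = feature[5:]
--     elif feature.startswith("num__"):
--         raw = feature[5:]
--
--     for col in sorted(columns, key=len, reverse=True):
--         if raw == col or raw.startswith(col + "_"):
--             return col
--     return raw
-- ===== SOURCE B (Python) =====
-- def _feature_to_variable_name(feature: str, columns: list[str]) -> str:
--     raw = feature[5:] if feature.startswith("cat__") or feature.startswith("num__") else feature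
--     colset = set(columns)
--     # candidates: every prefix of raw that ends right before an underscore, plus raw itself
--     cands = [raw[:i] for i in range(len(raw)) if raw[i] == "_"] + [raw]
--     for cand in reversed(cands):  # longest first
--         if cand in colset:
--             return cand
--     return raw
-- ===== Notes on version B (the rewrite author's own statement) =====
-- stated objective: faster
-- what changed: Instead of scanning every column (sorted by length, longest first) for one that equals raw or is an underscore-prefix of it, B enumerates raw's own underscore-delimited prefixes longest-first and returns the first one found in a hash set built from the columns.
import Mathlib
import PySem

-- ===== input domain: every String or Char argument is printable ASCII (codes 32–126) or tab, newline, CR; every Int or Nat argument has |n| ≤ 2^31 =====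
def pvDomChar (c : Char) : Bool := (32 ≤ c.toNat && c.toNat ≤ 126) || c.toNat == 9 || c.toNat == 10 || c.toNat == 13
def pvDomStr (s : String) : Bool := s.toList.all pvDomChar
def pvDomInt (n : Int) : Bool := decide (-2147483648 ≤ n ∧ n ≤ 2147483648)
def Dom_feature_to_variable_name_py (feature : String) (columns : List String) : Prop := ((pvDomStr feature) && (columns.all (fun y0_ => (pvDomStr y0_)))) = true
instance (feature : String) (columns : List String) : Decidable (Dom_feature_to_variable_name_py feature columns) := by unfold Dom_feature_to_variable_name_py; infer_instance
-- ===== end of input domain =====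

-- B replaces A's scan over all columns sorted by length with a walk over raw's own
-- underscore-delimited prefixes, longest first, checked against a set of the columns (objective: faster, measured).

-- ===== PORT A =====
def feature_to_variable_name_py (feature : String) (columns : List String) : String :=
  let raw :=
    if PySem.Str.startswith feature "cat__" then PySem.Str.slice feature (some 5) none
    else if PySem.Str.startswith feature "num__" then PySem.Str.slice feature (some 5) none
    else feature
  match (PySem.List.sorted columns (fun s => s.length) true).find?
      (fun col => raw == col || PySem.Str.startswith raw (col ++ "_")) with
  | some col => col
  | none => raw

-- ===== PORT B =====
def feature_to_variable_name_py_alt (feature : String) (columns : List String) : String :=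
  let raw :=
    if PySem.Str.startswith feature "cat__" || PySem.Str.startswith feature "num__" then
      PySem.Str.slice feature (some 5) none
    else feature
  let colset : PySem.Set String := PySem.Set.ofList columns
  let cands : List String :=
    ((PySem.List.pyRange 0 (PySem.Str.len raw)).filter
        (fun i => PySem.Str.pyGet? raw i == some '_')).map
      (fun i => PySem.Str.slice raw none (some i)) ++ [raw]
  match cands.reverse.find? (fun c => PySem.Set.contains colset c) with
  | some c => c
  | none => raw

-- ===== PRECONDITION & SPEC =====
def Spec_feature_to_variable_name_py (feature : String) (columns : List String) (out : String) : Prop := out = feature_to_variable_name_py_alt feature columns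
instance (feature : String) (columns : List String) (out : String) : Decidable (Spec_feature_to_variable_name_py feature columns out) := by unfold Spec_feature_to_variable_name_py; infer_instance

-- ===== CLAIM (what is proved, stated in full; the proofs are below) =====
def Claim_equal_feature_to_variable_name_py : Prop := ∀ (feature : String) (columns : List String), Dom_feature_to_variable_name_py feature columns → Spec_feature_to_variable_name_py feature columns (feature_to_variable_name_py feature columns)

-- ===== LEMMAS AND PROOFS =====

-- a list is a prefix of r up to an underscore iff it is r's take at an underscore position
theorem pv_prefix_underscore (l r : List Char) :
    (l ++ ['_'] <+: r) ↔ ∃ i : Nat, i < r.length ∧ r[i]? = some '_' ∧ l = r.take i := by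
  constructor
  · rintro ⟨t, ht⟩
    rw [List.append_assoc] at ht
    refine ⟨l.length, ?_, ?_, ?_⟩
    · subst ht; simp
    · subst ht
      rw [List.getElem?_append_right (le_refl _)]
      simp
    · subst ht
      simp
  · rintro ⟨i, hi, hget, hl⟩
    have : l ++ ['_'] = r.take (i + 1) := by
      rw [List.take_add_one, hl, hget]
      rfl
    rw [this]
    exact List.take_prefix _ _

theorem pv_str_eq_take (raw c : String) (k : Nat) :
    (c = PySem.Str.slice raw none (some (k : Int))) ↔ c.toList = raw.toList.take k := by
  rw [← String.toList_inj]
  simp [PySem.List.slice_to_natCast]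

-- B's candidate list membership = A's match predicate, over a fixed raw
theorem pv_mem_cands (raw c : String) :
    (c ∈ ((PySem.List.pyRange 0 (PySem.Str.len raw)).filter
        (fun i => PySem.Str.pyGet? raw i == some '_')).map
      (fun i => PySem.Str.slice raw none (some i)) ++ [raw]) ↔
    ((raw == c || PySem.Str.startswith raw (c ++ "_")) = true) := by
  have hlen : PySem.Str.len raw = (raw.toList.length : Int) := by
    simp [PySem.Str.len]
  rw [List.mem_append, List.mem_map]
  simp only [List.mem_filter, PySem.List.mem_pyRange_one, Bool.or_eq_true, beq_iff_eq,
    PySem.Str.startswith_eq, PySem.Chars.startswith_iff, String.toList_append]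
  have hu : ("_" : String).toList = ['_'] := by decide
  rw [hu, pv_prefix_underscore]
  constructor
  · rintro (⟨i, ⟨⟨h0, hN⟩, hg⟩, hc⟩ | hc)
    · right
      obtain ⟨k, rfl⟩ : ∃ k : Nat, i = (k : Int) := ⟨i.toNat, (Int.toNat_of_nonneg h0).symm⟩
      refine ⟨k, ?_, ?_, ?_⟩
      · rw [hlen] at hN; exact_mod_cast hN
      · simpa using hg
      · exact (pv_str_eq_take raw c k).mp hc.symm
    · left; simp at hc; simp [hc]
  · rintro (h | ⟨k, hk, hg, hc⟩)
    · right; simp [h]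
    · left
      refine ⟨(k : Int), ⟨⟨by positivity, ?_⟩, ?_⟩, ?_⟩
      · rw [hlen]; exact_mod_cast hk
      · simpa using hg
      · exact ((pv_str_eq_take raw c k).mpr hc).symm

-- B's reversed candidate list has strictly decreasing lengths
theorem pv_cands_rev_pairwise (raw : String) :
    (((PySem.List.pyRange 0 (PySem.Str.len raw)).filter
        (fun i => PySem.Str.pyGet? raw i == some '_')).map
      (fun i => PySem.Str.slice raw none (some i)) ++ [raw]).reverse.Pairwise
      (fun a b => b.length < a.length) := by
  have hlen : PySem.Str.len raw = (raw.toList.length : Int) := by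
    simp [PySem.Str.len]
  have hflen : ∀ i ∈ (PySem.List.pyRange 0 (PySem.Str.len raw)).filter
      (fun i => PySem.Str.pyGet? raw i == some '_'),
      ((PySem.Str.slice raw none (some i)).length : Int) = i := by
    intro i hi
    obtain ⟨⟨h0, hN⟩, _⟩ := List.mem_filter.mp hi |>.imp (fun h => PySem.List.mem_pyRange_one.mp h) id
    obtain ⟨k, rfl⟩ : ∃ k : Nat, i = (k : Int) := ⟨i.toNat, (Int.toNat_of_nonneg h0).symm⟩
    have hk : k ≤ raw.toList.length := by rw [hlen] at hN; exact_mod_cast le_of_lt hN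
    have hT : (PySem.Str.slice raw none (some (k : Int))).toList = raw.toList.take k := by
      simp [PySem.List.slice_to_natCast]
    have hL : (PySem.Str.slice raw none (some (k : Int))).length = k := by
      rw [← String.length_toList] at *
      rw [hT, List.length_take]
      omega
    rw [hL]
  rw [List.pairwise_reverse, List.pairwise_append]
  refine ⟨?_, List.pairwise_singleton _ _, ?_⟩
  · rw [List.pairwise_map]
    have hp := (PySem.List.pairwise_lt_pyRange_one 0 (PySem.Str.len raw)).filter
      (fun i => PySem.Str.pyGet? raw i == some '_')
    have := List.Pairwise.and_mem.mp hp
    refine this.imp_of_mem ?_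
    intro a b ha hb h
    have h1 := hflen a ha
    have h2 := hflen b hb
    have : ((PySem.Str.slice raw none (some a)).length : Int) < ((PySem.Str.slice raw none (some b)).length : Int) := by
      rw [h1, h2]; exact h.2.2
    exact_mod_cast this
  · intro a ha b hb
    rw [List.mem_singleton] at hb
    subst b
    obtain ⟨i, hi, rfl⟩ := List.mem_map.mp ha
    have h1 := hflen i hi
    obtain ⟨⟨h0, hN⟩, _⟩ := List.mem_filter.mp hi |>.imp (fun h => PySem.List.mem_pyRange_one.mp h) id
    have : ((PySem.Str.slice raw none (some i)).length : Int) < (raw.length : Int) := by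
      rw [h1, ← String.length_toList]
      rw [hlen] at hN; exact_mod_cast hN
    exact_mod_cast this

theorem pv_find?_congr {α : Type} (p q : α → Bool) (l : List α)
    (h : ∀ x ∈ l, p x = q x) : l.find? p = l.find? q := by
  induction l with
  | nil => rfl
  | cons a t ih =>
    simp only [List.find?]
    rw [h a (List.mem_cons_self)]
    cases hq : q a
    · exact ih fun x hx => h x (List.mem_cons_of_mem _ hx)
    · rfl

-- the crux: the first match in a length-nonincreasing list equals the first candidate
-- (from a strictly length-decreasing list) that is a member
theorem pv_find_sorted_eq (l C : List String) (P : String → Bool)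
    (hl : l.Pairwise (fun a b => b.length ≤ a.length))
    (hC : C.Pairwise (fun a b => b.length < a.length))
    (hP : ∀ x, P x = true ↔ x ∈ C) :
    l.find? P = C.find? (fun c => decide (c ∈ l)) := by
  cases hfC : C.find? (fun c => decide (c ∈ l)) with
  | none =>
    rw [List.find?_eq_none] at hfC ⊢
    intro x hx hPx
    exact hfC x ((hP x).mp hPx) (by simpa using hx)
  | some b =>
    rw [List.find?_eq_some_iff_append] at hfC
    obtain ⟨hbl, cs, ds, hCeq, hcs⟩ := hfC
    simp only [decide_eq_true_eq] at hbl
    have hbC : b ∈ C := by rw [hCeq]; exact List.mem_append_right _ (List.mem_cons_self)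
    have hPb : P b = true := (hP b).mpr hbC
    cases hfl : l.find? P with
    | none =>
      rw [List.find?_eq_none] at hfl
      exact absurd hPb (hfl b hbl)
    | some a =>
      rw [List.find?_eq_some_iff_append] at hfl
      obtain ⟨hPa, as, bs, hleq, has⟩ := hfl
      have hbmem : b ∈ a :: bs := by
        rcases (by rw [hleq] at hbl; exact List.mem_append.mp hbl) with h | h
        · exact absurd hPb (by simpa using has b h)
        · exact h
      have hblen : b = a ∨ b.length ≤ a.length := by
        rcases List.mem_cons.mp hbmem with h | h
        · exact Or.inl h
        · right
          rw [hleq, List.pairwise_append] at hl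
          exact (List.pairwise_cons.mp hl.2.1).1 b h
      have haC : a ∈ C := (hP a).mp hPa
      have hal : a ∈ l := by rw [hleq]; exact List.mem_append_right _ (List.mem_cons_self)
      have hamem : a ∈ b :: ds := by
        rcases (by rw [hCeq] at haC; exact List.mem_append.mp haC) with h | h
        · exact absurd hal (by simpa using hcs a h)
        · exact h
      have halen : a = b ∨ a.length < b.length := by
        rcases List.mem_cons.mp hamem with h | h
        · exact Or.inl h
        · right
          rw [hCeq, List.pairwise_append] at hC
          exact (List.pairwise_cons.mp hC.2.1).1 a h
      rcases halen with h | h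
      · rw [h]
      · rcases hblen with h2 | h2
        · rw [h2]
        · omega

-- both loop results agree for any fixed raw
theorem pv_main (raw : String) (columns : List String) :
    (match (PySem.List.sorted columns (fun s => s.length) true).find?
        (fun col => raw == col || PySem.Str.startswith raw (col ++ "_")) with
     | some col => col
     | none => raw) =
    (match (((PySem.List.pyRange 0 (PySem.Str.len raw)).filter
          (fun i => PySem.Str.pyGet? raw i == some '_')).map
        (fun i => PySem.Str.slice raw none (some i)) ++ [raw]).reverse.find?
        (fun c => PySem.Set.contains (PySem.Set.ofList columns) c) with
     | some c => c
     | none => raw) := by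
  have hfind := pv_find_sorted_eq (PySem.List.sorted columns (fun s => s.length) true)
    ((((PySem.List.pyRange 0 (PySem.Str.len raw)).filter
          (fun i => PySem.Str.pyGet? raw i == some '_')).map
        (fun i => PySem.Str.slice raw none (some i)) ++ [raw]).reverse)
    (fun col => raw == col || PySem.Str.startswith raw (col ++ "_"))
    (PySem.List.sorted_pairwise_rev columns (fun s => s.length))
    (pv_cands_rev_pairwise raw)
    (by intro x; rw [List.mem_reverse]; exact (pv_mem_cands raw x).symm)
  rw [hfind]
  rw [pv_find?_congr _ (fun c => PySem.Set.contains (PySem.Set.ofList columns) c)]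
  intro x _
  have h1 : x ∈ PySem.List.sorted columns (fun s => s.length) true ↔ x ∈ columns :=
    PySem.List.mem_sorted columns (fun s => s.length) true x
  have h2 : PySem.Set.contains (PySem.Set.ofList columns) x = true ↔ x ∈ columns := by
    rw [PySem.Set.contains_iff, PySem.Set.mem_ofList]
  rcases hcc : PySem.Set.contains (PySem.Set.ofList columns) x with _ | _
  · simp only [decide_eq_false_iff_not]
    rw [h1]; intro hx; rw [← h2] at hx; rw [hcc] at hx; exact absurd hx (by simp)
  · simp only [decide_eq_true_eq]
    rw [h1]; exact h2.mp hcc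

-- proof-side names for the stripped feature of each port
def pvRawA (feature : String) : String :=
  if PySem.Str.startswith feature "cat__" then PySem.Str.slice feature (some 5) none
  else if PySem.Str.startswith feature "num__" then PySem.Str.slice feature (some 5) none
  else feature

def pvRawB (feature : String) : String :=
  if PySem.Str.startswith feature "cat__" || PySem.Str.startswith feature "num__" then
    PySem.Str.slice feature (some 5) none
  else feature

theorem pv_raw_eq (feature : String) : pvRawA feature = pvRawB feature := by
  unfold pvRawA pvRawB
  cases PySem.Str.startswith feature "cat__" <;>
    cases PySem.Str.startswith feature "num__" <;> simp

theorem pv_A_eq (feature : String) (columns : List String) :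
    feature_to_variable_name_py feature columns =
      (match (PySem.List.sorted columns (fun s => s.length) true).find?
          (fun col => pvRawA feature == col ||
            PySem.Str.startswith (pvRawA feature) (col ++ "_")) with
       | some col => col
       | none => pvRawA feature) := by
  unfold feature_to_variable_name_py pvRawA
  rfl

theorem pv_B_eq (feature : String) (columns : List String) :
    feature_to_variable_name_py_alt feature columns =
      (match (((PySem.List.pyRange 0 (PySem.Str.len (pvRawB feature))).filter
            (fun i => PySem.Str.pyGet? (pvRawB feature) i == some '_')).map
          (fun i => PySem.Str.slice (pvRawB feature) none (some i)) ++ [pvRawB feature]).reverse.find?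
          (fun c => PySem.Set.contains (PySem.Set.ofList columns) c) with
       | some c => c
       | none => pvRawB feature) := by
  simp only [feature_to_variable_name_py_alt]
  unfold pvRawB
  rfl

-- ===== VERDICT (by name: the statement is the Claim_ definition above) =====
theorem feature_to_variable_name_py_spec : Claim_equal_feature_to_variable_name_py := by
  intro feature columns _hdom
  unfold Spec_feature_to_variable_name_py
  rw [pv_A_eq feature columns, pv_B_eq feature columns, pv_raw_eq feature]
  exact pv_main (pvRawB feature) columns
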